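-- pv_equiv track=rewrite | github.com/PedroBadii/pruebaGitHub | listas/tiene_diptongo.py | tiene_diptongo
-- ===== SOURCE A (Python) =====
-- def tiene_diptongo(palabra):
--     '''
--     >>> tiene_diptongo('perro')
--     False
--     >>> tiene_diptongo('hiato')
--     True
--     >>> tiene_diptongo('aire')
--     True
--     >>> tiene_diptongo('ofiuco')
--     True
--     >>> tiene_diptongo('chiita')
--     False
--
--     '''
--     diptongo = False
--     vocales_cerradas = ['i', 'u']
--     vocales_abiertas = ['a', 'e', 'o']
--
--     for i in range(len(palabra)-1):
--         if (palabra[i] in vocales_cerradas and palabra[i+1] in vocales_abiertas) or \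
--         (palabra[i] in vocales_abiertas and palabra[i+1] in vocales_cerradas) or \
--         (palabra[i] in vocales_cerradas and palabra[i+1] in vocales_cerradas and palabra[i] != palabra[i+1]):
--             diptongo = True
--
--     return diptongo
-- ===== SOURCE B (Python) =====
-- DIPTONGOS = ('ia', 'ie', 'io', 'ua', 'ue', 'uo',
--              'ai', 'ei', 'oi', 'au', 'eu', 'ou',
--              'iu', 'ui')
--
--
-- def tiene_diptongo(palabra):
--     return any(bg in palabra for bg in DIPTONGOS)
-- ===== Notes on version B (the rewrite author's own statement) =====
-- stated objective: simpler
-- what changed: B replaces the index loop that classifies each character pair against open/closed vowel lists with a single any() over a fixed table of the 14 valid diphthong bigrams, each checked by substring search.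
import Mathlib
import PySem

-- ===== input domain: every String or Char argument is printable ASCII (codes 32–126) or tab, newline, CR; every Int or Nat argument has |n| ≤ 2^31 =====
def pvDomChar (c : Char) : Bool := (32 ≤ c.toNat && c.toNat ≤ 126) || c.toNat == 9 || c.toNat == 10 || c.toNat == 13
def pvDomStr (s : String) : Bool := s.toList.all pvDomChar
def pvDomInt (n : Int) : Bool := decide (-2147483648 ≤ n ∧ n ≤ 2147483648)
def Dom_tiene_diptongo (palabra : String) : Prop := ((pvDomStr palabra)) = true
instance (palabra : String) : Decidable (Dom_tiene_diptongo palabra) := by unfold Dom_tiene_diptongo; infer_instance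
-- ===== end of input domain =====

-- B replaces A's index loop classifying character pairs by a fixed table of the 14
-- valid diphthong bigrams checked by substring search (objective: simpler).

-- ===== PORT A =====
def pvCerradas : List Char := ['i', 'u']
def pvAbiertas : List Char := ['a', 'e', 'o']

def tiene_diptongo (palabra : String) : Bool :=
  (PySem.List.pyRange 0 (PySem.Str.len palabra - 1) 1).foldl
    (fun diptongo i =>
      let c := PySem.List.pyGetD palabra.toList i ' '
      let d := PySem.List.pyGetD palabra.toList (i + 1) ' '
      if (c ∈ pvCerradas ∧ d ∈ pvAbiertas) ∨ (c ∈ pvAbiertas ∧ d ∈ pvCerradas) ∨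
         (c ∈ pvCerradas ∧ d ∈ pvCerradas ∧ c ≠ d) then true else diptongo)
    false

-- ===== PORT B =====
def pvDiptongos : List String :=
  ["ia", "ie", "io", "ua", "ue", "uo", "ai", "ei", "oi", "au", "eu", "ou", "iu", "ui"]

def tiene_diptongo_alt (palabra : String) : Bool :=
  pvDiptongos.any (fun bg => PySem.Str.isIn bg palabra)

-- ===== PRECONDITION & SPEC =====
def Spec_tiene_diptongo (palabra : String) (out : Bool) : Prop := out = tiene_diptongo_alt palabra
instance (palabra : String) (out : Bool) : Decidable (Spec_tiene_diptongo palabra out) := by unfold Spec_tiene_diptongo; infer_instance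

-- ===== CLAIM (what is proved, stated in full; the proofs are below) =====
def Claim_equal_tiene_diptongo : Prop := ∀ (palabra : String), Dom_tiene_diptongo palabra → Spec_tiene_diptongo palabra (tiene_diptongo palabra)

-- ===== LEMMAS AND PROOFS =====

-- A's per-position test, as a Bool predicate on an adjacent pair of characters.
def dipA (a b : Char) : Bool :=
  decide ((a ∈ pvCerradas ∧ b ∈ pvAbiertas) ∨ (a ∈ pvAbiertas ∧ b ∈ pvCerradas) ∨
          (a ∈ pvCerradas ∧ b ∈ pvCerradas ∧ a ≠ b))

-- "some adjacent pair satisfies dipA", structurally.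
def adjAny : List Char → Bool
  | a :: b :: t => dipA a b || adjAny (b :: t)
  | _ => false

-- B's bigram table as character pairs.
def pvPairs : List (Char × Char) :=
  [('i','a'), ('i','e'), ('i','o'), ('u','a'), ('u','e'), ('u','o'),
   ('a','i'), ('e','i'), ('o','i'), ('a','u'), ('e','u'), ('o','u'),
   ('i','u'), ('u','i')]

theorem foldl_or_if (P : Int → Prop) [DecidablePred P] (r : List Int) (b : Bool) :
    r.foldl (fun d i => if P i then true else d) b = (b || r.any (fun i => decide (P i))) := by
  induction r generalizing b with
  | nil => simp
  | cons x xs ih =>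
    simp only [List.foldl_cons, List.any_cons, ih]
    split_ifs with h <;> simp [h]

theorem pyGetD_natCast_succ {α : Type} (xs : List α) (k : Nat) (d : α) :
    PySem.List.pyGetD xs ((k : Int) + 1) d = xs.getD (k + 1) d := by
  rw [show ((k : Int) + 1) = (((k + 1 : Nat)) : Int) by push_cast; ring, PySem.List.pyGetD_natCast]

theorem rangeAny (l : List Char) :
    (List.range (l.length - 1)).any (fun j => dipA (l.getD j ' ') (l.getD (j + 1) ' ')) = adjAny l := by
  match l with
  | [] => simp [adjAny]
  | [a] => simp [adjAny]
  | a :: b :: t =>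
    have ih := rangeAny (b :: t)
    simp only [List.length_cons, Nat.add_sub_cancel] at ih ⊢
    rw [List.range_succ_eq_map]
    simp only [List.any_cons, List.any_map, Function.comp_def, Nat.succ_eq_add_one,
      List.getD_cons_succ, List.getD_cons_zero] at ih ⊢
    rw [ih]
    simp [adjAny]

theorem portA_eq_adjAny (palabra : String) : tiene_diptongo palabra = adjAny palabra.toList := by
  unfold tiene_diptongo
  rw [foldl_or_if, Bool.false_or, PySem.Str.len_eq, PySem.List.pyRange_one]
  have hn : ((palabra.toList.length : Int) - 1 - 0).toNat = palabra.toList.length - 1 := by omega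
  rw [hn, List.any_map]
  simp only [Function.comp_def, zero_add, PySem.List.pyGetD_natCast, pyGetD_natCast_succ]
  exact rangeAny palabra.toList

theorem dip_mem (a b : Char) : dipA a b = true ↔ (a, b) ∈ pvPairs := by
  constructor
  · intro h
    simp only [dipA, pvCerradas, pvAbiertas, List.mem_cons, List.not_mem_nil, or_false,
      decide_eq_true_eq] at h
    rcases h with ⟨(rfl | rfl), (rfl | rfl | rfl)⟩ | ⟨(rfl | rfl | rfl), (rfl | rfl)⟩ |
      ⟨(rfl | rfl), (rfl | rfl), hne⟩ <;> first | decide | exact absurd rfl hne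
  · intro h
    simp only [pvPairs, List.mem_cons, List.not_mem_nil, or_false, Prod.mk.injEq] at h
    rcases h with ⟨rfl, rfl⟩ | ⟨rfl, rfl⟩ | ⟨rfl, rfl⟩ | ⟨rfl, rfl⟩ | ⟨rfl, rfl⟩ | ⟨rfl, rfl⟩ |
      ⟨rfl, rfl⟩ | ⟨rfl, rfl⟩ | ⟨rfl, rfl⟩ | ⟨rfl, rfl⟩ | ⟨rfl, rfl⟩ | ⟨rfl, rfl⟩ |
      ⟨rfl, rfl⟩ | ⟨rfl, rfl⟩ <;> decide

theorem infix_pair (x y a b : Char) (t : List Char) :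
    [x, y] <:+: a :: b :: t ↔ (x = a ∧ y = b) ∨ [x, y] <:+: b :: t := by
  rw [List.infix_cons_iff, List.cons_prefix_cons, List.cons_prefix_cons]
  simp

theorem adjAny_iff (l : List Char) :
    adjAny l = true ↔ ∃ p ∈ pvPairs, [p.1, p.2] <:+: l := by
  match l with
  | [] =>
    simp only [adjAny, Bool.false_eq_true, false_iff, not_exists, not_and]
    intro p _ h
    have := h.length_le
    simp at this
  | [a] =>
    simp only [adjAny, Bool.false_eq_true, false_iff, not_exists, not_and]
    intro p _ h
    have := h.length_le
    simp at this
  | a :: b :: t =>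
    simp only [adjAny, Bool.or_eq_true, dip_mem, adjAny_iff (b :: t)]
    constructor
    · rintro (h | ⟨p, hp, hinf⟩)
      · exact ⟨(a, b), h, by rw [infix_pair]; exact Or.inl ⟨rfl, rfl⟩⟩
      · exact ⟨p, hp, by rw [infix_pair]; exact Or.inr hinf⟩
    · rintro ⟨p, hp, hinf⟩
      rw [infix_pair] at hinf
      rcases hinf with ⟨h1, h2⟩ | h
      · left
        have : p = (a, b) := by cases p; simp_all
        rw [this] at hp; exact hp
      · exact Or.inr ⟨p, hp, h⟩

theorem portB_iff (palabra : String) :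
    tiene_diptongo_alt palabra = true ↔ ∃ p ∈ pvPairs, [p.1, p.2] <:+: palabra.toList := by
  unfold tiene_diptongo_alt
  rw [List.any_eq_true]
  constructor
  · rintro ⟨bg, hbg, hin⟩
    rw [PySem.Str.isIn_iff_infix] at hin
    fin_cases hbg <;>
      first
        | exact ⟨('i','a'), by decide, hin⟩ | exact ⟨('i','e'), by decide, hin⟩
        | exact ⟨('i','o'), by decide, hin⟩ | exact ⟨('u','a'), by decide, hin⟩
        | exact ⟨('u','e'), by decide, hin⟩ | exact ⟨('u','o'), by decide, hin⟩
        | exact ⟨('a','i'), by decide, hin⟩ | exact ⟨('e','i'), by decide, hin⟩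
        | exact ⟨('o','i'), by decide, hin⟩ | exact ⟨('a','u'), by decide, hin⟩
        | exact ⟨('e','u'), by decide, hin⟩ | exact ⟨('o','u'), by decide, hin⟩
        | exact ⟨('i','u'), by decide, hin⟩ | exact ⟨('u','i'), by decide, hin⟩
  · rintro ⟨p, hp, hinf⟩
    fin_cases hp <;>
      first
        | exact ⟨"ia", by decide, by rw [PySem.Str.isIn_iff_infix]; exact hinf⟩
        | exact ⟨"ie", by decide, by rw [PySem.Str.isIn_iff_infix]; exact hinf⟩
        | exact ⟨"io", by decide, by rw [PySem.Str.isIn_iff_infix]; exact hinf⟩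
        | exact ⟨"ua", by decide, by rw [PySem.Str.isIn_iff_infix]; exact hinf⟩
        | exact ⟨"ue", by decide, by rw [PySem.Str.isIn_iff_infix]; exact hinf⟩
        | exact ⟨"uo", by decide, by rw [PySem.Str.isIn_iff_infix]; exact hinf⟩
        | exact ⟨"ai", by decide, by rw [PySem.Str.isIn_iff_infix]; exact hinf⟩
        | exact ⟨"ei", by decide, by rw [PySem.Str.isIn_iff_infix]; exact hinf⟩
        | exact ⟨"oi", by decide, by rw [PySem.Str.isIn_iff_infix]; exact hinf⟩
        | exact ⟨"au", by decide, by rw [PySem.Str.isIn_iff_infix]; exact hinf⟩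
        | exact ⟨"eu", by decide, by rw [PySem.Str.isIn_iff_infix]; exact hinf⟩
        | exact ⟨"ou", by decide, by rw [PySem.Str.isIn_iff_infix]; exact hinf⟩
        | exact ⟨"iu", by decide, by rw [PySem.Str.isIn_iff_infix]; exact hinf⟩
        | exact ⟨"ui", by decide, by rw [PySem.Str.isIn_iff_infix]; exact hinf⟩

-- ===== VERDICT (by name: the statement is the Claim_ definition above) =====
theorem tiene_diptongo_spec : Claim_equal_tiene_diptongo := by
  intro palabra _
  unfold Spec_tiene_diptongo
  rw [Bool.eq_iff_iff, portA_eq_adjAny, adjAny_iff, portB_iff]
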